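-- pv_equiv track=rewrite | github.com/eduardo-moro/reconhecimento-facial | reconhecimento/app.py | strtr
-- ===== SOURCE A (Python) =====
-- def strtr(strng, replace):
--     buf, i = [], 0
--     if strng is not None:
--         while i < len(strng):
--             for s, r in replace.items():
--                 if strng[i:len(s)+i] == s:
--                     buf.append(r)
--                     i += len(s)
--                     break
--             else:
--                 buf.append(strng[i])
--                 i += 1
--         return ''.join(buf)
--     else:
--         return False
-- ===== SOURCE B (Python) =====
-- def strtr(strng, replace):
--     if strng is None:
--         return False
--     pieces = []
--     rest = strng
--     while rest:
--         # first replacement pair whose key is a prefix of the remainder,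
--         # defaulting to the "copy one character" pair
--         k, v = next(((k, v) for k, v in replace.items() if rest.startswith(k)),
--                     (rest[0], rest[0]))
--         pieces.append(v)
--         rest = rest[len(k):]
--     return ''.join(pieces)
-- ===== Notes on version B (the rewrite author's own statement) =====
-- stated objective: simpler
-- what changed: B consumes a shrinking suffix of the string instead of tracking an index, and merges A's for/else into one step by picking the first matching (key, value) pair with a default 'copy one character' pair, so the loop body is a single append-and-drop.
import Mathlib
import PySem

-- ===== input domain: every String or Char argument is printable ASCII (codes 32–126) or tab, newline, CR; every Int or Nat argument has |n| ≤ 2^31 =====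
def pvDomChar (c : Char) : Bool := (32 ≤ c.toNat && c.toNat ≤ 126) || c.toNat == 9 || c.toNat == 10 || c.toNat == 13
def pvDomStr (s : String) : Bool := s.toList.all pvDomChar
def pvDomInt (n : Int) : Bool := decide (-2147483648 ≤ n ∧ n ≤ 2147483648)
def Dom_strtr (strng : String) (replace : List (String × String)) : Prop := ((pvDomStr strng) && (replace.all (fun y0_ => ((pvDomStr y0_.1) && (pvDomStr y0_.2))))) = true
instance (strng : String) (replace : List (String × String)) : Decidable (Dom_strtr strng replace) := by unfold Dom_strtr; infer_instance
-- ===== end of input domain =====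

-- B consumes a shrinking suffix instead of an index and merges A's for/else into one
-- pick-with-default step (simpler decomposition); return-value equivalence.

-- ===== PORT A =====
-- ''.join(buf)
def pvJoin (buf : List String) : String := buf.foldl (· ++ ·) ""

-- the inner 'for s, r in replace.items(): if strng[i:len(s)+i] == s: … break'; none = the for-loop's else
def strtrFind (s : List Char) (i : Nat) : List (String × String) → Option (String × String)
  | [] => none
  | (k, r) :: rest =>
    if PySem.List.slice s (some (i : Int)) (some ((k.length + i : Nat) : Int)) = k.toList
    then some (k, r) else strtrFind s i rest

-- the while loop; the fuel argument (strng.length + 1 at the call site) only totalizes the recursion: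
-- whenever every key is nonempty each iteration advances i by at least 1, so the fuel is never exhausted
def strtrLoop (s : List Char) (items : List (String × String)) : Nat → Nat → List String → List String
  | 0, _, buf => buf
  | fuel + 1, i, buf =>
    if h : i < s.length then
      match strtrFind s i items with
      | some (k, r) => strtrLoop s items fuel (i + k.length) (buf ++ [r])
      | none => strtrLoop s items fuel (i + 1) (buf ++ [String.ofList [s[i]]])
    else buf

def strtr (strng : String) (replace : List (String × String)) : String :=
  -- replace.items(): the dict built from the association list, in insertion order
  pvJoin (strtrLoop strng.toList (PySem.Dict.ofList replace).items (strng.toList.length + 1) 0 [])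

-- ===== PORT B =====
-- next(((k, v) for k, v in replace.items() if rest.startswith(k)), (rest[0], rest[0]));
-- the key is kept as List Char so its length drives the drop below
def strtrAltPick (rest : List Char) (c : Char) : List (String × String) → List Char × String
  | [] => ([c], String.ofList [c])
  | (k, v) :: more =>
    if k.toList.isPrefixOf rest then (k.toList, v) else strtrAltPick rest c more

-- 'while rest:' — recursion on the remaining suffix; fuel (strng.length + 1) only totalizes it,
-- exactly as in A's port
def strtrAltLoop (items : List (String × String)) : Nat → List Char → List String → List String
  | 0, _, pieces => pieces
  | fuel + 1, rest, pieces =>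
    match rest with
    | [] => pieces
    | c :: _ =>
      let kv := strtrAltPick rest c items
      strtrAltLoop items fuel (rest.drop kv.1.length) (pieces ++ [kv.2])

def strtr_alt (strng : String) (replace : List (String × String)) : String :=
  String.join (strtrAltLoop (PySem.Dict.ofList replace).items (strng.toList.length + 1) strng.toList [])

-- ===== PRECONDITION & SPEC =====
def Spec_strtr (strng : String) (replace : List (String × String)) (out : String) : Prop :=
  out = strtr_alt strng replace
instance (strng : String) (replace : List (String × String)) (out : String) :
    Decidable (Spec_strtr strng replace out) := by unfold Spec_strtr; infer_instance

-- ===== CLAIM (what is proved, stated in full; the proofs are below) =====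
def Claim_equal_strtr : Prop := ∀ (strng : String) (replace : List (String × String)),
  Dom_strtr strng replace → Spec_strtr strng replace (strtr strng replace)

-- ===== LEMMAS AND PROOFS =====

-- A's slice test is B's prefix test on the dropped suffix
theorem cond_eq (s : List Char) (i : Nat) (k : String) :
    (PySem.List.slice s (some (i : Int)) (some ((k.length + i : Nat) : Int)) = k.toList)
      ↔ k.toList.isPrefixOf (s.drop i) = true := by
  rw [PySem.List.slice_natCast]
  have h2 : k.length + i - i = k.toList.length := by simp
  rw [h2, List.isPrefixOf_iff_prefix, List.prefix_iff_eq_take]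
  exact eq_comm

-- A's scan and B's pick-with-default agree item by item
theorem find_pick (s : List Char) (i : Nat) (c : Char) (items : List (String × String)) :
    strtrAltPick (s.drop i) c items =
      match strtrFind s i items with
      | some (k, r) => (k.toList, r)
      | none => ([c], String.ofList [c]) := by
  induction items with
  | nil => simp [strtrFind, strtrAltPick]
  | cons kv rest ih =>
    obtain ⟨k, v⟩ := kv
    simp only [strtrFind, strtrAltPick]
    by_cases h : k.toList.isPrefixOf (s.drop i) = true
    · rw [if_pos h, if_pos ((cond_eq s i k).mpr h)]
    · rw [if_neg h, if_neg (fun hc => h ((cond_eq s i k).mp hc))]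
      exact ih

-- the two loops walk in lockstep: A at index i is B at the suffix s.drop i
theorem loop_eq (s : List Char) (items : List (String × String)) (fuel : Nat) :
    ∀ (i : Nat) (buf : List String),
      strtrLoop s items fuel i buf = strtrAltLoop items fuel (s.drop i) buf := by
  induction fuel with
  | zero => intro i buf; rfl
  | succ fuel ih =>
    intro i buf
    simp only [strtrLoop, strtrAltLoop]
    by_cases h : i < s.length
    · rw [dif_pos h]
      have hd : s.drop i = s[i] :: s.drop (i + 1) := (List.getElem_cons_drop h).symm
      rw [hd]
      simp only [← hd, find_pick s i s[i] items]
      cases hf : strtrFind s i items with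
      | some kv =>
        obtain ⟨k, r⟩ := kv
        simp only
        rw [ih (i + k.length) (buf ++ [r])]
        simp
      | none =>
        simp only
        rw [ih (i + 1) (buf ++ [String.ofList [s[i]]])]
        simp
    · rw [dif_neg h]
      have : s.drop i = [] := List.drop_eq_nil_of_le (by omega)
      rw [this]

-- ===== VERDICT (by name: the statement is the Claim_ definition above) =====
theorem strtr_spec : Claim_equal_strtr := by
  intro strng replace _
  unfold Spec_strtr strtr strtr_alt
  rw [loop_eq, List.drop_zero]
  rfl
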